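-- pv_equiv track=rewrite | github.com/mastatomba/advent-of-code | python/2024/day-16-2024.py | calculate_path_score
-- ===== SOURCE A (Python) =====
-- def calculate_path_score(path, end):
--     score = 0
--     path.append(end)
--     cur = path[0]
--     dir = '>'
--     for i in range (1, len(path)):
--         next = path[i]
--         if (cur[1] > next[1]):
--             if (dir == '>'):
--                 score += 1
--             else:
--                 score += 1001
--                 dir = '>'
--         elif (cur[1] < next[1]):
--             if (dir == '<'):
--                 score += 1
--             else:
--                 score += 1001
--                 dir = '<'
--         elif (cur[0] > next[0]):
--             if (dir == '^'):
--                 score += 1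
--             else:
--                 score += 1001
--                 dir = '^'
--         elif (cur[0] < next[0]):
--             if (dir == 'v'):
--                 score += 1
--             else:
--                 score += 1001
--                 dir = 'v'
--         cur = next
--     return score;
-- ===== SOURCE B (Python) =====
-- def calculate_path_score(path, end):
--     path.append(end)
--
--     def sdir(a, b):
--         # direction of a distinct step, y-comparison first (same priority as the maze scorer)
--         if a[1] > b[1]:
--             return '>'
--         if a[1] < b[1]:
--             return '<'
--         if a[0] > b[0]:
--             return '^'
--         return 'v'
--
--     # collapse consecutive duplicate points: they contribute nothing
--     pts = [path[0]]
--     for p in path[1:]: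
--         if p != pts[-1]:
--             pts.append(p)
--
--     if len(pts) == 1:
--         return 0
--     # a turn happens at every triple of points whose two steps head differently
--     turns = sum(1 for a, b, c in zip(pts, pts[1:], pts[2:]) if sdir(a, b) != sdir(b, c))
--     if sdir(pts[0], pts[1]) != '>':
--         turns += 1
--     return (len(pts) - 1) + 1000 * turns
-- ===== Notes on version B (the rewrite author's own statement) =====
-- stated objective: alternative
-- what changed: B deduplicates consecutive equal points, takes moves = len(pts)-1 directly from the compressed geometry, and counts turns as corner points detected by a sliding triple-window test on the points themselves (plus one if the first step is not eastward), instead of A's stateful loop that threads a current direction and accumulates 1/1001 per step.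
import Mathlib
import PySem

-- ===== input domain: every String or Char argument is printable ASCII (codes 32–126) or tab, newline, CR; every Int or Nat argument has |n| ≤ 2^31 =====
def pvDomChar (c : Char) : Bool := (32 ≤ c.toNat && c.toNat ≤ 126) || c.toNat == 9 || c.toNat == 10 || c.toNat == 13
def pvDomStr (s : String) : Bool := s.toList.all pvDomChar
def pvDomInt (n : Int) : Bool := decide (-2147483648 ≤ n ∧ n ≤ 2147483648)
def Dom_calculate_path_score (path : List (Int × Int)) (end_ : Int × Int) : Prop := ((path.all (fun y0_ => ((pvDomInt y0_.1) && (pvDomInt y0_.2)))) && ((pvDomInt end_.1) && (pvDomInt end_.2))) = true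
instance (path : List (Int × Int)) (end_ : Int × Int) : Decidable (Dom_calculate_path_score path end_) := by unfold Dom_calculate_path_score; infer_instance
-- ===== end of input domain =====

-- B dedups consecutive equal points and counts moves/corners geometrically instead of A's
-- direction-threading 1/1001 loop. Equivalence is about the RETURN value;
-- both Pythons mutate `path` identically (append(end)).

-- ===== PORT A =====
-- one loop iteration of A: state (cur, dir, score), nested if/elif chain exactly as in A
def pvAStep (st : (Int × Int) × Char × Int) (next : Int × Int) : (Int × Int) × Char × Int :=
  let cur := st.1; let dir := st.2.1; let score := st.2.2
  if cur.2 > next.2 then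
    if dir = '>' then (next, dir, score + 1) else (next, '>', score + 1001)
  else if cur.2 < next.2 then
    if dir = '<' then (next, dir, score + 1) else (next, '<', score + 1001)
  else if cur.1 > next.1 then
    if dir = '^' then (next, dir, score + 1) else (next, '^', score + 1001)
  else if cur.1 < next.1 then
    if dir = 'v' then (next, dir, score + 1) else (next, 'v', score + 1001)
  else (next, dir, score)

def calculate_path_score (path : List (Int × Int)) (end_ : Int × Int) : Int :=
  -- path.append(end); cur = path[0]; the loop over range(1, len(path)) walks the tail with cur tracking
  let p := path ++ [end_]
  (p.tail.foldl pvAStep (p.headD (0, 0), '>', (0 : Int))).2.2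

-- ===== PORT B =====
-- sdir: direction of a distinct step, y-comparison first
def pvSdir (a b : Int × Int) : Char :=
  if a.2 > b.2 then '>' else if a.2 < b.2 then '<' else if a.1 > b.1 then '^' else 'v'

-- the dedup loop of Source B: keep p only when it differs from the last kept point
def pvDedupGo : (Int × Int) → List (Int × Int) → List (Int × Int)
  | _, [] => []
  | last, p :: rest => if p ≠ last then p :: pvDedupGo p rest else pvDedupGo last rest

def calculate_path_score_alt (path : List (Int × Int)) (end_ : Int × Int) : Int :=
  let p := path ++ [end_]
  let pts := match p with
    | [] => []            -- unreachable: p ends with end_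
    | h :: t => h :: pvDedupGo h t
  if pts.length = 1 then 0
  else
    -- zip(pts, pts[1:], pts[2:]) triple-window corner count
    let turns : Int :=
      ((pts.zip (pts.tail.zip pts.tail.tail)).filter
        (fun x => pvSdir x.1 x.2.1 ≠ pvSdir x.2.1 x.2.2)).length
    -- pts[0], pts[1] exist here (length ≥ 2), so headD defaults are never used
    let turns := if pvSdir (pts.headD (0, 0)) (pts.tail.headD (0, 0)) ≠ '>' then turns + 1 else turns
    ((pts.length : Int) - 1) + 1000 * turns

-- ===== PRECONDITION & SPEC =====
def Spec_calculate_path_score (path : List (Int × Int)) (end_ : Int × Int) (out : Int) : Prop := out = calculate_path_score_alt path end_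
instance (path : List (Int × Int)) (end_ : Int × Int) (out : Int) : Decidable (Spec_calculate_path_score path end_ out) := by unfold Spec_calculate_path_score; infer_instance

-- ===== CLAIM =====
def Claim_equal_calculate_path_score : Prop := ∀ (path : List (Int × Int)) (end_ : Int × Int), Dom_calculate_path_score path end_ → Spec_calculate_path_score path end_ (calculate_path_score path end_)

-- ===== LEMMAS AND PROOFS =====

-- direction of a pair as A's branch chain sees it: none iff the points are equal
def pvStepDir (a b : Int × Int) : Option Char :=
  if a.2 > b.2 then some '>'
  else if a.2 < b.2 then some '<'
  else if a.1 > b.1 then some '^'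
  else if a.1 < b.1 then some 'v'
  else none

-- A's score on a direction list, starting from facing `prev`
def pvCost (prev : Char) (ds : List Char) : Int :=
  (ds.length : Int) + 1000 * (ds.foldl (fun (s : Int × Char) d => (if d ≠ s.2 then s.1 + 1 else s.1, d)) (0, prev)).1

-- number of direction changes, recursively
def pvChanges (prev : Char) : List Char → Int
  | [] => 0
  | d :: ds => (if d ≠ prev then 1 else 0) + pvChanges d ds

-- directions of consecutive pairs
def pvDirs : List (Int × Int) → List Char
  | a :: b :: r => pvSdir a b :: pvDirs (b :: r)
  | _ => []

theorem pvTurns_shift' (ds : List Char) (k : Int) (prev : Char) :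
    (ds.foldl (fun (s : Int × Char) d => (if d = s.2 then s.1 else s.1 + 1, d)) (k, prev)).1
    = k + (ds.foldl (fun (s : Int × Char) d => (if d = s.2 then s.1 else s.1 + 1, d)) (0, prev)).1 := by
  induction ds generalizing k prev with
  | nil => simp
  | cons d ds ih =>
    simp only [List.foldl_cons]
    by_cases h : d = prev
    · simp only [if_pos h]
      exact ih k d
    · simp only [if_neg h]
      rw [ih (k + 1) d, ih (0 + 1) d]; ring

theorem pvCost_cons (prev d : Char) (ds : List Char) :
    pvCost prev (d :: ds) = (if d = prev then 1 else 1001) + pvCost d ds := by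
  simp only [pvCost, List.foldl_cons, List.length_cons]
  by_cases h : d = prev
  · simp [h]; ring
  · simp [h]; rw [pvTurns_shift' ds 1 d]; ring

theorem pvCost_eq_changes (prev : Char) (ds : List Char) :
    pvCost prev ds = (ds.length : Int) + 1000 * pvChanges prev ds := by
  induction ds generalizing prev with
  | nil => simp [pvCost, pvChanges]
  | cons d ds ih =>
    rw [pvCost_cons, ih, pvChanges]
    by_cases h : d = prev <;> simp [h] <;> ring

-- the key invariant: A's fold starting at (cur, dir, score) adds pvCost dir (directions of cur::l)
theorem pvA_fold (l : List (Int × Int)) (cur : Int × Int) (dir : Char) (score : Int) :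
    (l.foldl pvAStep (cur, dir, score)).2.2
    = score + pvCost dir (((cur :: l).zip l).filterMap (fun ab => pvStepDir ab.1 ab.2)) := by
  induction l generalizing cur dir score with
  | nil => simp [pvCost]
  | cons b l ih =>
    simp only [List.zip_cons_cons, List.filterMap_cons, List.foldl_cons]
    rcases cur with ⟨cx, cy⟩; rcases b with ⟨bx, by_⟩
    by_cases h1 : cy > by_
    · by_cases hd : dir = '>'
      · simp [pvAStep, pvStepDir, h1, hd, ih, pvCost_cons]; ring
      · simp [pvAStep, pvStepDir, h1, hd, ih, pvCost_cons, Ne.symm hd]; ring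
    · by_cases h2 : cy < by_
      · by_cases hd : dir = '<'
        · simp [pvAStep, pvStepDir, h1, h2, hd, ih, pvCost_cons]; ring
        · simp [pvAStep, pvStepDir, h1, h2, hd, ih, pvCost_cons, Ne.symm hd]; ring
      · by_cases h3 : cx > bx
        · by_cases hd : dir = '^'
          · simp [pvAStep, pvStepDir, h1, h2, h3, hd, ih, pvCost_cons]; ring
          · simp [pvAStep, pvStepDir, h1, h2, h3, hd, ih, pvCost_cons, Ne.symm hd]; ring
        · by_cases h4 : cx < bx
          · by_cases hd : dir = 'v'
            · simp [pvAStep, pvStepDir, h1, h2, h3, h4, hd, ih, pvCost_cons]; ring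
            · simp [pvAStep, pvStepDir, h1, h2, h3, h4, hd, ih, pvCost_cons, Ne.symm hd]; ring
          · simp [pvAStep, pvStepDir, h1, h2, h3, h4, ih]

theorem pvStepDir_eq_none (a : Int × Int) : pvStepDir a a = none := by
  rcases a with ⟨x, y⟩; simp [pvStepDir]

theorem pvStepDir_eq_some (a b : Int × Int) (h : b ≠ a) : pvStepDir a b = some (pvSdir a b) := by
  rcases a with ⟨ax, ay⟩; rcases b with ⟨bx, by_⟩
  by_cases h1 : ay > by_
  · simp [pvStepDir, pvSdir, h1]
  · by_cases h2 : ay < by_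
    · simp [pvStepDir, pvSdir, h1, h2]
    · by_cases h3 : ax > bx
      · simp [pvStepDir, pvSdir, h1, h2, h3]
      · have hx : ax < bx := by
          rcases lt_trichotomy ax bx with hl | he | hg
          · exact hl
          · exfalso; apply h; simp [he.symm]; omega
          · exact absurd hg h3
        simp [pvStepDir, pvSdir, h1, h2, h3, hx]

-- A's filtered direction list over the raw points = directions of the dedup'd points
theorem pvDirs_dedup (l : List (Int × Int)) (cur : Int × Int) :
    (((cur :: l).zip l).filterMap (fun ab => pvStepDir ab.1 ab.2))
    = pvDirs (cur :: pvDedupGo cur l) := by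
  induction l generalizing cur with
  | nil => simp [pvDedupGo, pvDirs]
  | cons p rest ih =>
    simp only [List.zip_cons_cons, List.filterMap_cons, pvDedupGo]
    by_cases h : p = cur
    · subst h
      simp [pvStepDir_eq_none, ih]
    · rw [pvStepDir_eq_some cur p h, if_pos h]
      simp only [pvDirs]
      rw [ih p]

-- B's triple-window corner count = pvChanges along the direction list
theorem pvCount3 (a b : Int × Int) (r : List (Int × Int)) :
    (((((a :: b :: r).zip ((a :: b :: r).tail.zip (a :: b :: r).tail.tail))).filter
        (fun x => pvSdir x.1 x.2.1 ≠ pvSdir x.2.1 x.2.2)).length : Int)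
    = pvChanges (pvSdir a b) (pvDirs (b :: r)) := by
  induction r generalizing a b with
  | nil => simp [pvDirs, pvChanges]
  | cons c r ih =>
    have hib := ih b c
    simp only [List.tail_cons, List.zip_cons_cons, List.filter_cons, pvDirs, pvChanges, ne_eq,
      decide_not] at hib ⊢
    by_cases h : pvSdir a b = pvSdir b c
    · simp [h, hib]
    · simp [h, Ne.symm h, hib]
      ring

theorem pvDirs_length (a : Int × Int) (t : List (Int × Int)) :
    (pvDirs (a :: t)).length = t.length := by
  induction t generalizing a with
  | nil => simp [pvDirs]
  | cons b r ih => simp [pvDirs, ih b]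

-- ===== VERDICT =====
theorem calculate_path_score_spec : Claim_equal_calculate_path_score := by
  intro path end_ _
  unfold Spec_calculate_path_score calculate_path_score calculate_path_score_alt
  rcases hp : path ++ [end_] with _ | ⟨c, l⟩
  · simp at hp
  · simp only [List.tail_cons, List.headD_cons]
    rw [pvA_fold, pvDirs_dedup]
    rcases hg : pvDedupGo c l with _ | ⟨b, r⟩
    · simp [pvDirs, pvCost]
    · have hlen : (c :: b :: r).length ≠ 1 := by simp
      simp only [hlen, if_false]
      rw [pvCost_eq_changes]
      simp only [pvDirs, pvChanges, List.headD_cons, List.tail_cons]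
      have h3 := pvCount3 c b r
      simp only [List.tail_cons, ne_eq, decide_not] at h3
      simp only [ne_eq, decide_not]
      rw [← h3]
      simp only [List.length_cons, pvDirs_length]
      by_cases hd : pvSdir c b = '>'
      · simp [hd]
      · simp [hd]
        ring
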